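-- pv_equiv track=rewrite | github.com/NikolasMatias/urionlinejudge-exercises | Iniciante/Python/exercise_1847.py | calculateResult
-- ===== SOURCE A (Python) =====
-- def calculateResult(valor_a, valor_b, valor_c):
--     possibilities = [
--         {
--             'result': lambda: valor_a > valor_b and valor_b < valor_c,
--             'answer': ':)'
--         },
--         {
--             'result': lambda: valor_a < valor_b and valor_b > valor_c,
--             'answer': ':('
--         },
--         {
--             'result': lambda: valor_a < valor_b and valor_b < valor_c and (valor_c-valor_b < valor_b-valor_a),
--             'answer': ':('
--         },
--         {
--             'result': lambda: valor_a < valor_b and valor_b < valor_c and (valor_c-valor_b >= valor_b-valor_a),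
--             'answer': ':)'
--         },
--         {
--             'result': lambda: valor_a > valor_b and valor_b > valor_c and (valor_b-valor_c < valor_a-valor_b),
--             'answer': ':)'
--         },
--         {
--             'result': lambda: valor_a > valor_b and valor_b > valor_c and (valor_b-valor_c > valor_a-valor_b),
--             'answer': ':('
--         },
--         {
--             'result': lambda: valor_a == valor_b and valor_b < valor_c,
--             'answer': ':)'
--         },
--         {
--             'result': lambda: valor_a == valor_b and valor_b > valor_c,
--             'answer': ':('
--         }
--     ]
--     for possibility in possibilities:
--         if possibility['result']():
--             return possibility['answer']
-- ===== SOURCE B (Python) =====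
-- def calculateResult(valor_a, valor_b, valor_c):
--     d1 = valor_b - valor_a
--     d2 = valor_c - valor_b
--     if d2 == 0:
--         return None
--     if d2 > 0:
--         if d1 > 0:
--             return ':)' if d2 >= d1 else ':('
--         return ':)'
--     # d2 < 0
--     if d1 < 0:
--         if d2 > d1:
--             return ':)'
--         if d2 < d1:
--             return ':('
--         return None
--     return ':('
-- ===== Notes on version B (the rewrite author's own statement) =====
-- stated objective: simpler
-- what changed: Replaces the scan over eight lambda-predicate dicts with a direct sign analysis of the two differences d1=b-a and d2=c-b, branching on their signs and magnitudes.
import Mathlib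
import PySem

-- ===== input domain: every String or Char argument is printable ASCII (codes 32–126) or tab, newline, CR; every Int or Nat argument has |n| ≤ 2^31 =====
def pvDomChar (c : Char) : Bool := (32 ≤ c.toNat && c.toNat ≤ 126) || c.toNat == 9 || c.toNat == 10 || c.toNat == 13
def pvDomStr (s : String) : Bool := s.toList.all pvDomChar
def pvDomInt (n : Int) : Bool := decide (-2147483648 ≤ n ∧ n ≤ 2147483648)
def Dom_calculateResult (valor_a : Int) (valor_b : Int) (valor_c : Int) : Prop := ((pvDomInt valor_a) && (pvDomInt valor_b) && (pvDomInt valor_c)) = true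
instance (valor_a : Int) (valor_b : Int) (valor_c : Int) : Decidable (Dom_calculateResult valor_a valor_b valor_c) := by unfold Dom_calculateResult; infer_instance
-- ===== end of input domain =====

-- ===== PORT A =====
-- One honest line: B replaces A's scan over eight predicate/answer dicts with a direct sign
-- analysis of the differences d1 = b-a and d2 = c-b (simpler decomposition, same O(1) cost).
def calculateResult (valor_a : Int) (valor_b : Int) (valor_c : Int) : Option String :=
  let possibilities : List ((Unit → Bool) × String) := [
    (fun _ => valor_a > valor_b && valor_b < valor_c, ":)"),
    (fun _ => valor_a < valor_b && valor_b > valor_c, ":("),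
    (fun _ => valor_a < valor_b && valor_b < valor_c && (valor_c - valor_b < valor_b - valor_a), ":("),
    (fun _ => valor_a < valor_b && valor_b < valor_c && (valor_c - valor_b ≥ valor_b - valor_a), ":)"),
    (fun _ => valor_a > valor_b && valor_b > valor_c && (valor_b - valor_c < valor_a - valor_b), ":)"),
    (fun _ => valor_a > valor_b && valor_b > valor_c && (valor_b - valor_c > valor_a - valor_b), ":("),
    (fun _ => valor_a == valor_b && valor_b < valor_c, ":)"),
    (fun _ => valor_a == valor_b && valor_b > valor_c, ":(")]
  (possibilities.find? (fun p => p.1 ())).map (fun p => p.2)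

-- ===== PORT B =====
def calculateResult_alt (valor_a : Int) (valor_b : Int) (valor_c : Int) : Option String :=
  let d1 := valor_b - valor_a
  let d2 := valor_c - valor_b
  if d2 = 0 then none
  else if d2 > 0 then
    if d1 > 0 then (if d2 ≥ d1 then some ":)" else some ":(") else some ":)"
  else
    if d1 < 0 then
      if d2 > d1 then some ":)"
      else if d2 < d1 then some ":("
      else none
    else some ":("

-- ===== PRECONDITION & SPEC =====
def Spec_calculateResult (valor_a : Int) (valor_b : Int) (valor_c : Int) (out : Option String) : Prop := out = calculateResult_alt valor_a valor_b valor_c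
instance (valor_a : Int) (valor_b : Int) (valor_c : Int) (out : Option String) : Decidable (Spec_calculateResult valor_a valor_b valor_c out) := by unfold Spec_calculateResult; infer_instance

-- ===== CLAIM (what is proved, stated in full; the proofs are below) =====
def Claim_equal_calculateResult : Prop := ∀ (valor_a : Int) (valor_b : Int) (valor_c : Int), Dom_calculateResult valor_a valor_b valor_c → Spec_calculateResult valor_a valor_b valor_c (calculateResult valor_a valor_b valor_c)

-- ===== LEMMAS AND PROOFS =====

-- ===== VERDICT (by name: the statement is the Claim_ definition above) =====
set_option maxHeartbeats 1000000 in
theorem calculateResult_spec : Claim_equal_calculateResult := by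
  intro a b c _
  unfold Spec_calculateResult calculateResult calculateResult_alt
  by_cases heq : a = b <;> by_cases hba : b < a <;>
    by_cases hab : a < b <;> by_cases hbc : b < c <;>
    by_cases hcb : c < b <;>
    first
    | (exfalso; omega)
    | (by_cases h1 : c - b < b - a <;>
       by_cases h2 : b - a ≤ c - b <;>
       by_cases h3 : b - c < a - b <;>
       by_cases h4 : a - b < b - c <;>
       first
       | (exfalso; omega)
       | (simp_all only [List.find?_cons, List.find?_nil, not_lt, gt_iff_lt,
            ge_iff_le, decide_true, decide_false, Bool.true_and, Bool.and_true,
            Bool.and_false, Bool.and_self, Option.map_some] <;>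
          split_ifs <;> (repeat' split) <;> simp_all <;> omega))
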